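-- pv_equiv track=rewrite | github.com/varlogtim/xcalar | scripts/default.py | __intervalDict
-- ===== SOURCE A (Python) =====
-- def __intervalDict(interval):
--     res = [0] * 7
--     words = interval.split(" ")
--     for i in range(len(words))[2::2]:
--         if words[i] == "years":
--             res[0] = int(words[i-1])
--         elif words[i] == "months":
--             res[1] = int(words[i-1])
--         elif words[i] == "weeks":
--             res[2] = int(words[i-1])
--         elif words[i] == "days":
--             res[3] = int(words[i-1])
--         elif words[i] == "hours":
--             res[4] = int(words[i-1])
--         elif words[i] == "minutes":
--             res[5] = int(words[i-1])
--         elif words[i] == "seconds":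
--             res[6] = int(words[i-1])
--     return res
-- ===== SOURCE B (Python) =====
-- def __intervalDict(interval):
--     words = interval.split(" ")
--     parsed = dict(zip(words[2::2], words[1::2]))
--     return [int(parsed[u]) if u in parsed else 0
--             for u in ("years", "months", "weeks", "days", "hours", "minutes", "seconds")]
-- ===== Notes on version B (the rewrite author's own statement) =====
-- stated objective: simpler
-- what changed: Replaces A's index loop over range(len(words))[2::2] with an in-place elif chain mutating a fixed 7-slot array by building a unit->value dict from zip(words[2::2], words[1::2]) and then selecting int(value)-or-0 for each unit of the ordered unit table.
import Mathlib
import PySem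

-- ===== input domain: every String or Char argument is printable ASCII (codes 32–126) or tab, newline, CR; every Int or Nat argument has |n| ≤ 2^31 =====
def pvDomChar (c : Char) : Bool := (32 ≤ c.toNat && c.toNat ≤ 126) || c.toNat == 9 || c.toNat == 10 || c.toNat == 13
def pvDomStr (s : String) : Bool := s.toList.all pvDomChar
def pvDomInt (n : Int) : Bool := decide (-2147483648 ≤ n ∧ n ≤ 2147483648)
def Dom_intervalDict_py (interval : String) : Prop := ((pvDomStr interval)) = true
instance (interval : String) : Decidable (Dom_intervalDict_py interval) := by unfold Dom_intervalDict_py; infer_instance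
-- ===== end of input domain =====

-- B replaces A's index loop with its elif chain by a dict built from the two
-- slices plus a selection pass over the ordered unit table (objective: simpler).

-- ===== PORT A =====
def intervalDict_py (interval : String) : List Int :=
  let res : List Int := PySem.List.pyRepeat [0] 7
  let words : List String := (PySem.Str.split? interval " ").getD []
  ((PySem.List.slice? (PySem.List.pyRange 0 (words.length : Int) 1) (some 2) none 2).getD []).foldl
    (fun res i =>
      if PySem.List.pyGetD words i "" == "years" then
        PySem.List.pySetD res 0 ((PySem.Int.ofStr? (PySem.List.pyGetD words (i - 1) "")).getD 0)
      else if PySem.List.pyGetD words i "" == "months" then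
        PySem.List.pySetD res 1 ((PySem.Int.ofStr? (PySem.List.pyGetD words (i - 1) "")).getD 0)
      else if PySem.List.pyGetD words i "" == "weeks" then
        PySem.List.pySetD res 2 ((PySem.Int.ofStr? (PySem.List.pyGetD words (i - 1) "")).getD 0)
      else if PySem.List.pyGetD words i "" == "days" then
        PySem.List.pySetD res 3 ((PySem.Int.ofStr? (PySem.List.pyGetD words (i - 1) "")).getD 0)
      else if PySem.List.pyGetD words i "" == "hours" then
        PySem.List.pySetD res 4 ((PySem.Int.ofStr? (PySem.List.pyGetD words (i - 1) "")).getD 0)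
      else if PySem.List.pyGetD words i "" == "minutes" then
        PySem.List.pySetD res 5 ((PySem.Int.ofStr? (PySem.List.pyGetD words (i - 1) "")).getD 0)
      else if PySem.List.pyGetD words i "" == "seconds" then
        PySem.List.pySetD res 6 ((PySem.Int.ofStr? (PySem.List.pyGetD words (i - 1) "")).getD 0)
      else res)
    res

-- ===== PORT B =====
def unitsB : List String := ["years", "months", "weeks", "days", "hours", "minutes", "seconds"]

def intervalDict_py_alt (interval : String) : List Int :=
  let words : List String := (PySem.Str.split? interval " ").getD []
  let parsed : PySem.Dict String String :=
    PySem.Dict.ofList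
      (List.zip ((PySem.List.slice? words (some 2) none 2).getD [])
                ((PySem.List.slice? words (some 1) none 2).getD []))
  unitsB.map (fun u =>
    if parsed.contains u then (PySem.Int.ofStr? ((parsed.get? u).getD "")).getD 0 else 0)

-- ===== PRECONDITION & SPEC =====
-- Pre_ excludes exactly the inputs on which the Python A raises ValueError:
-- some word at an even index ≥ 2 is a unit name whose preceding word is not int-parsable.
def Pre_intervalDict_py (interval : String) : Prop :=
  ∀ p ∈ List.zip ((PySem.List.slice? ((PySem.Str.split? interval " ").getD []) (some 2) none 2).getD [])
                 ((PySem.List.slice? ((PySem.Str.split? interval " ").getD []) (some 1) none 2).getD []),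
      p.1 ∈ unitsB → (PySem.Int.ofStr? p.2).isSome = true
instance (interval : String) : Decidable (Pre_intervalDict_py interval) := by
  unfold Pre_intervalDict_py; infer_instance

def pvWitness_intervalDict_py : String := "@ 5 years 3 days"

def Spec_intervalDict_py (interval : String) (out : List Int) : Prop := out = intervalDict_py_alt interval
instance (interval : String) (out : List Int) : Decidable (Spec_intervalDict_py interval out) := by unfold Spec_intervalDict_py; infer_instance

-- ===== CLAIM (what is proved, stated in full; the proofs are below) =====
def Claim_equal_intervalDict_py : Prop := ∀ (interval : String), Dom_intervalDict_py interval → Pre_intervalDict_py interval → Spec_intervalDict_py interval (intervalDict_py interval)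


-- ===== LEMMAS AND PROOFS =====

-- every second element of a list, starting with the first
def eo {α : Type} : List α → List α
  | [] => []
  | [a] => [a]
  | a :: _ :: t => a :: eo t

-- the (unit, value) pairs a split word list yields (rest starts at the value position)
def goPairs : List String → List (String × String)
  | v :: u :: t => (u, v) :: goPairs t
  | _ => []

-- A's loop body as a function of the pair
def stepA (res : List Int) (p : String × String) : List Int :=
  if p.1 == "years" then PySem.List.pySetD res 0 ((PySem.Int.ofStr? p.2).getD 0)
  else if p.1 == "months" then PySem.List.pySetD res 1 ((PySem.Int.ofStr? p.2).getD 0)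
  else if p.1 == "weeks" then PySem.List.pySetD res 2 ((PySem.Int.ofStr? p.2).getD 0)
  else if p.1 == "days" then PySem.List.pySetD res 3 ((PySem.Int.ofStr? p.2).getD 0)
  else if p.1 == "hours" then PySem.List.pySetD res 4 ((PySem.Int.ofStr? p.2).getD 0)
  else if p.1 == "minutes" then PySem.List.pySetD res 5 ((PySem.Int.ofStr? p.2).getD 0)
  else if p.1 == "seconds" then PySem.List.pySetD res 6 ((PySem.Int.ofStr? p.2).getD 0)
  else res

-- last-wins value for one unit over the pair list
def lastv (u : String) (P : List (String × String)) (d : Int) : Int :=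
  P.foldl (fun acc p => if p.1 == u then (PySem.Int.ofStr? p.2).getD 0 else acc) d

def lastOpt (u : String) (P : List (String × String)) (o : Option String) : Option String :=
  P.foldl (fun acc p => if p.1 == u then some p.2 else acc) o

lemma eo_cons {α : Type} (a : α) (l : List α) : eo (a :: l) = a :: eo (l.drop 1) := by
  cases l <;> simp [eo]

lemma filterMap_eo {α : Type} (v : List α) :
    List.filterMap (fun k => v[2 * k]?) (List.range ((v.length + 1) / 2)) = eo v := by
  induction v using eo.induct with
  | case1 => simp [eo]
  | case2 a => simp [eo, List.range_succ]
  | case3 a b t ih =>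
    have h : ((a :: b :: t).length + 1) / 2 = (t.length + 1) / 2 + 1 := by simp; omega
    rw [h, List.range_succ_eq_map]
    simp only [List.filterMap_cons, List.filterMap_map]
    simp only [Nat.mul_zero, List.getElem?_cons_zero, eo]
    rw [List.filterMap_congr (g := fun k => t[2 * k]?) (by intro k _; simp [Nat.mul_succ])]
    simp [ih]

lemma slice?_step2 {α : Type} (w : List α) (j : Nat) :
    (PySem.List.slice? w (some (j : Int)) none 2).getD [] = eo (w.drop j) := by
  rw [PySem.List.slice?, PySem.List.sliceIndices]
  simp only [if_neg (by norm_num : ¬ (2:Int) = 0)]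
  by_cases hj : j < w.length
  · have hs : ¬ ((j : Int) < 0) := by omega
    have hmin : min (j : Int) (w.length : Int) = (j : Int) := by omega
    simp only [hs, if_false, if_neg (by norm_num : ¬ (2:Int) < 0), hmin]
    have hlt : (j : Int) < (w.length : Int) := by exact_mod_cast hj
    simp only [if_pos (by norm_num : (0:Int) < 2), if_pos hlt, Option.getD_some]
    have hcnt : (((w.length : Int) - j + 2 - 1) / 2).toNat = ((w.drop j).length + 1) / 2 := by
      simp only [List.length_drop]
      omega
    rw [hcnt, ← filterMap_eo (w.drop j)]
    apply List.filterMap_congr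
    intro k _
    have : ((j : Int) + 2 * (k : Int)).toNat = j + 2 * k := by omega
    rw [this, ← List.getElem?_drop]
  · have hs : ¬ ((j : Int) < 0) := by omega
    have hmin : min (j : Int) (w.length : Int) = (w.length : Int) := by omega
    simp only [hs, if_false, if_neg (by norm_num : ¬ (2:Int) < 0), hmin]
    have hnlt : ¬ ((w.length : Int) < (w.length : Int)) := by omega
    simp only [if_pos (by norm_num : (0:Int) < 2), hnlt, if_false, Option.getD_some]
    have : w.drop j = [] := by
      apply List.drop_eq_nil_of_le; omega
    simp [this, eo]

lemma slice?_two {α : Type} (w : List α) :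
    (PySem.List.slice? w (some 2) none 2).getD [] = eo (w.drop 2) := by
  have h := slice?_step2 w 2
  simpa using h

lemma slice?_one {α : Type} (w : List α) :
    (PySem.List.slice? w (some 1) none 2).getD [] = eo (w.drop 1) := by
  have h := slice?_step2 w 1
  simpa using h

lemma eo_pyRange_cons (a b : Int) (h : a < b) :
    eo (PySem.List.pyRange a b 1) = a :: eo (PySem.List.pyRange (a + 2) b 1) := by
  rw [PySem.List.pyRange_one_cons h]
  by_cases h2 : a + 1 < b
  · rw [PySem.List.pyRange_one_cons h2, eo]
    have : a + 1 + 1 = a + 2 := by ring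
    rw [this]
  · rw [PySem.List.pyRange_one_eq_nil (by omega), PySem.List.pyRange_one_eq_nil (by omega)]
    simp [eo]

lemma zip_eo_goPairs (l : List String) :
    List.zip (eo (l.drop 1)) (eo l) = goPairs l := by
  induction l using eo.induct with
  | case1 => simp [eo, goPairs]
  | case2 a => simp [eo, goPairs]
  | case3 v u t ih =>
    rw [show (v :: u :: t).drop 1 = u :: t from rfl, eo_cons u t,
      show eo (v :: u :: t) = v :: eo t from rfl, goPairs]
    simp only [List.zip_cons_cons, ih]

lemma lastv_goPairs (u : String) (P : List (String × String)) :
    ∀ o : Option String,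
      (match lastOpt u P o with
       | some v => (PySem.Int.ofStr? v).getD 0
       | none => 0) =
      lastv u P (match o with
       | some v => (PySem.Int.ofStr? v).getD 0
       | none => 0) := by
  induction P with
  | nil => intro o; simp [lastOpt, lastv]
  | cons p t ih =>
    intro o
    simp only [lastOpt, lastv, List.foldl_cons]
    by_cases h : p.1 == u
    · simp only [h, if_true]
      exact ih (some p.2)
    · simp only [h]
      exact ih o

lemma get?_update (P : List (String × String)) :
    ∀ (d : PySem.Dict String String) (u : String),
      (d.update P).get? u = lastOpt u P (d.get? u) := by
  induction P with
  | nil => intro d u; simp [PySem.Dict.update, lastOpt]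
  | cons p t ih =>
    intro d u
    simp only [PySem.Dict.update, List.foldl_cons, lastOpt] at *
    rw [ih (d.insert p.1 p.2) u, PySem.Dict.get?_insert]
    by_cases h : p.1 = u
    · subst h; simp
    · simp [h, Ne.symm h]

lemma stepA_lit (k v : String) (a b c d e f g : Int) :
    stepA [a, b, c, d, e, f, g] (k, v) =
      [if k == "years" then (PySem.Int.ofStr? v).getD 0 else a,
       if k == "months" then (PySem.Int.ofStr? v).getD 0 else b,
       if k == "weeks" then (PySem.Int.ofStr? v).getD 0 else c,
       if k == "days" then (PySem.Int.ofStr? v).getD 0 else d,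
       if k == "hours" then (PySem.Int.ofStr? v).getD 0 else e,
       if k == "minutes" then (PySem.Int.ofStr? v).getD 0 else f,
       if k == "seconds" then (PySem.Int.ofStr? v).getD 0 else g] := by
  unfold stepA
  simp only []
  split_ifs with h1 h2 h3 h4 h5 h6 h7 <;>
    simp_all [PySem.List.pySetD_of_nonneg]

lemma foldl_stepA (P : List (String × String)) :
    ∀ a b c d e f g : Int,
      P.foldl stepA [a, b, c, d, e, f, g] =
        [lastv "years" P a, lastv "months" P b, lastv "weeks" P c, lastv "days" P d,
         lastv "hours" P e, lastv "minutes" P f, lastv "seconds" P g] := by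
  induction P with
  | nil => intro a b c d e f g; simp [lastv]
  | cons p t ih =>
    intro a b c d e f g
    obtain ⟨k, v⟩ := p
    have hv : ∀ (u : String) (x : Int), lastv u ((k, v) :: t) x =
        lastv u t (if k == u then (PySem.Int.ofStr? v).getD 0 else x) := by
      intro u x; simp [lastv]
    simp only [List.foldl_cons]
    rw [stepA_lit, ih, hv, hv, hv, hv, hv, hv, hv]

-- A's indexed fold over the word list pre ++ rest equals the pair fold over goPairs rest
lemma foldA_goPairs (rest : List String) :
    ∀ (pre : List String) (res : List Int), 1 ≤ pre.length →
      (eo (PySem.List.pyRange ((pre.length : Int) + 1) (((pre ++ rest).length : Nat) : Int) 1)).foldl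
        (fun res i =>
          if PySem.List.pyGetD (pre ++ rest) i "" == "years" then
            PySem.List.pySetD res 0 ((PySem.Int.ofStr? (PySem.List.pyGetD (pre ++ rest) (i - 1) "")).getD 0)
          else if PySem.List.pyGetD (pre ++ rest) i "" == "months" then
            PySem.List.pySetD res 1 ((PySem.Int.ofStr? (PySem.List.pyGetD (pre ++ rest) (i - 1) "")).getD 0)
          else if PySem.List.pyGetD (pre ++ rest) i "" == "weeks" then
            PySem.List.pySetD res 2 ((PySem.Int.ofStr? (PySem.List.pyGetD (pre ++ rest) (i - 1) "")).getD 0)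
          else if PySem.List.pyGetD (pre ++ rest) i "" == "days" then
            PySem.List.pySetD res 3 ((PySem.Int.ofStr? (PySem.List.pyGetD (pre ++ rest) (i - 1) "")).getD 0)
          else if PySem.List.pyGetD (pre ++ rest) i "" == "hours" then
            PySem.List.pySetD res 4 ((PySem.Int.ofStr? (PySem.List.pyGetD (pre ++ rest) (i - 1) "")).getD 0)
          else if PySem.List.pyGetD (pre ++ rest) i "" == "minutes" then
            PySem.List.pySetD res 5 ((PySem.Int.ofStr? (PySem.List.pyGetD (pre ++ rest) (i - 1) "")).getD 0)
          else if PySem.List.pyGetD (pre ++ rest) i "" == "seconds" then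
            PySem.List.pySetD res 6 ((PySem.Int.ofStr? (PySem.List.pyGetD (pre ++ rest) (i - 1) "")).getD 0)
          else res)
        res
      = (goPairs rest).foldl stepA res := by
  induction rest using eo.induct with
  | case1 =>
    intro pre res hpre
    rw [PySem.List.pyRange_one_eq_nil (by
      simp only [List.length_append, List.length_nil]; omega)]
    simp [eo, goPairs]
  | case2 a =>
    intro pre res hpre
    rw [PySem.List.pyRange_one_eq_nil (by
      simp only [List.length_append, List.length_cons, List.length_nil]; omega)]
    simp [eo, goPairs]
  | case3 v u t ih =>
    intro pre res hpre
    have hcons : eo (PySem.List.pyRange ((pre.length : Int) + 1)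
          (((pre ++ v :: u :: t).length : Nat) : Int) 1) =
        ((pre.length : Int) + 1) :: eo (PySem.List.pyRange ((pre.length : Int) + 1 + 2)
          (((pre ++ v :: u :: t).length : Nat) : Int) 1) :=
      eo_pyRange_cons _ _ (by
        simp only [List.length_append, List.length_cons]; omega)
    rw [hcons]
    simp only [List.foldl_cons]
    have hu : PySem.List.pyGetD (pre ++ v :: u :: t) ((pre.length : Int) + 1) "" = u := by
      rw [show ((pre.length : Int) + 1) = ((pre.length + 1 : Nat) : Int) from by omega,
        PySem.List.pyGetD_natCast, List.getD_eq_getElem?_getD,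
        List.getElem?_append_right (by omega)]
      simp
    have hw : PySem.List.pyGetD (pre ++ v :: u :: t) ((pre.length : Int) + 1 - 1) "" = v := by
      rw [show ((pre.length : Int) + 1 - 1) = ((pre.length : Nat) : Int) from by omega,
        PySem.List.pyGetD_natCast, List.getD_eq_getElem?_getD,
        List.getElem?_append_right (by omega)]
      simp
    rw [hu, hw]
    rw [goPairs, List.foldl_cons]
    have hstep : (if (u == "years") = true then
          PySem.List.pySetD res 0 ((PySem.Int.ofStr? v).getD 0)
        else if (u == "months") = true then
          PySem.List.pySetD res 1 ((PySem.Int.ofStr? v).getD 0)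
        else if (u == "weeks") = true then
          PySem.List.pySetD res 2 ((PySem.Int.ofStr? v).getD 0)
        else if (u == "days") = true then
          PySem.List.pySetD res 3 ((PySem.Int.ofStr? v).getD 0)
        else if (u == "hours") = true then
          PySem.List.pySetD res 4 ((PySem.Int.ofStr? v).getD 0)
        else if (u == "minutes") = true then
          PySem.List.pySetD res 5 ((PySem.Int.ofStr? v).getD 0)
        else if (u == "seconds") = true then
          PySem.List.pySetD res 6 ((PySem.Int.ofStr? v).getD 0)
        else res) = stepA res (u, v) := rfl
    rw [hstep]
    rw [show pre ++ v :: u :: t = (pre ++ [v, u]) ++ t from by simp]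
    rw [show ((pre.length : Int) + 1 + 2) = (((pre ++ [v, u]).length : Nat) : Int) + 1 from by
      simp only [List.length_append, List.length_cons, List.length_nil]; omega]
    exact ih (pre ++ [v, u]) (stepA res (u, v)) (by simp)

lemma drop2_pyRange (n : Nat) :
    (PySem.List.pyRange 0 (n : Int) 1).drop 2 = PySem.List.pyRange 2 (n : Int) 1 := by
  by_cases h : 2 ≤ n
  · rw [PySem.List.pyRange_one_append 0 2 (n : Int) (by omega) (by omega)]
    rw [show PySem.List.pyRange 0 2 1 = [0, 1] from by decide]
    simp
  · interval_cases n <;> decide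

-- the two programs agree word-list-wise
lemma core (w : List String) :
    ((PySem.List.slice? (PySem.List.pyRange 0 ((w.length : Nat) : Int) 1) (some 2) none 2).getD []).foldl
      (fun res i =>
        if PySem.List.pyGetD w i "" == "years" then
          PySem.List.pySetD res 0 ((PySem.Int.ofStr? (PySem.List.pyGetD w (i - 1) "")).getD 0)
        else if PySem.List.pyGetD w i "" == "months" then
          PySem.List.pySetD res 1 ((PySem.Int.ofStr? (PySem.List.pyGetD w (i - 1) "")).getD 0)
        else if PySem.List.pyGetD w i "" == "weeks" then
          PySem.List.pySetD res 2 ((PySem.Int.ofStr? (PySem.List.pyGetD w (i - 1) "")).getD 0)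
        else if PySem.List.pyGetD w i "" == "days" then
          PySem.List.pySetD res 3 ((PySem.Int.ofStr? (PySem.List.pyGetD w (i - 1) "")).getD 0)
        else if PySem.List.pyGetD w i "" == "hours" then
          PySem.List.pySetD res 4 ((PySem.Int.ofStr? (PySem.List.pyGetD w (i - 1) "")).getD 0)
        else if PySem.List.pyGetD w i "" == "minutes" then
          PySem.List.pySetD res 5 ((PySem.Int.ofStr? (PySem.List.pyGetD w (i - 1) "")).getD 0)
        else if PySem.List.pyGetD w i "" == "seconds" then
          PySem.List.pySetD res 6 ((PySem.Int.ofStr? (PySem.List.pyGetD w (i - 1) "")).getD 0)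
        else res)
      (PySem.List.pyRepeat [0] 7)
    = unitsB.map (fun u =>
        if (PySem.Dict.ofList (List.zip ((PySem.List.slice? w (some 2) none 2).getD [])
              ((PySem.List.slice? w (some 1) none 2).getD []))).contains u then
          (PySem.Int.ofStr? (((PySem.Dict.ofList (List.zip ((PySem.List.slice? w (some 2) none 2).getD [])
              ((PySem.List.slice? w (some 1) none 2).getD []))).get? u).getD "")).getD 0
        else 0) := by
  have hinit : PySem.List.pyRepeat [0] 7 = ([0, 0, 0, 0, 0, 0, 0] : List Int) := by decide
  -- LHS to goPairs fold
  have hslices : List.zip ((PySem.List.slice? w (some 2) none 2).getD [])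
      ((PySem.List.slice? w (some 1) none 2).getD []) = goPairs (w.drop 1) := by
    rw [slice?_two, slice?_one]
    rw [show w.drop 2 = (w.drop 1).drop 1 from by simp]
    exact zip_eo_goPairs (w.drop 1)
  have hidx : (PySem.List.slice? (PySem.List.pyRange 0 ((w.length : Nat) : Int) 1) (some 2) none 2).getD []
      = eo (PySem.List.pyRange 2 ((w.length : Nat) : Int) 1) := by
    rw [slice?_two, drop2_pyRange]
  have hlhs : ∀ res : List Int,
      (eo (PySem.List.pyRange 2 ((w.length : Nat) : Int) 1)).foldl
        (fun res i =>
          if PySem.List.pyGetD w i "" == "years" then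
            PySem.List.pySetD res 0 ((PySem.Int.ofStr? (PySem.List.pyGetD w (i - 1) "")).getD 0)
          else if PySem.List.pyGetD w i "" == "months" then
            PySem.List.pySetD res 1 ((PySem.Int.ofStr? (PySem.List.pyGetD w (i - 1) "")).getD 0)
          else if PySem.List.pyGetD w i "" == "weeks" then
            PySem.List.pySetD res 2 ((PySem.Int.ofStr? (PySem.List.pyGetD w (i - 1) "")).getD 0)
          else if PySem.List.pyGetD w i "" == "days" then
            PySem.List.pySetD res 3 ((PySem.Int.ofStr? (PySem.List.pyGetD w (i - 1) "")).getD 0)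
          else if PySem.List.pyGetD w i "" == "hours" then
            PySem.List.pySetD res 4 ((PySem.Int.ofStr? (PySem.List.pyGetD w (i - 1) "")).getD 0)
          else if PySem.List.pyGetD w i "" == "minutes" then
            PySem.List.pySetD res 5 ((PySem.Int.ofStr? (PySem.List.pyGetD w (i - 1) "")).getD 0)
          else if PySem.List.pyGetD w i "" == "seconds" then
            PySem.List.pySetD res 6 ((PySem.Int.ofStr? (PySem.List.pyGetD w (i - 1) "")).getD 0)
          else res)
        res
      = (goPairs (w.drop 1)).foldl stepA res := by
    intro res
    cases w with
    | nil =>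
      rw [PySem.List.pyRange_one_eq_nil (by simp)]
      simp [eo, goPairs]
    | cons h t =>
      have := foldA_goPairs t [h] res (by simp)
      simpa using this
  rw [hidx, hinit, hlhs, hslices]
  rw [foldl_stepA]
  have hsel : ∀ u : String,
      (if (PySem.Dict.ofList (goPairs (w.drop 1))).contains u then
        (PySem.Int.ofStr? (((PySem.Dict.ofList (goPairs (w.drop 1))).get? u).getD "")).getD 0
      else 0) = lastv u (goPairs (w.drop 1)) 0 := by
    intro u
    have hg : (PySem.Dict.ofList (goPairs (w.drop 1))).get? u
        = lastOpt u (goPairs (w.drop 1)) none := by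
      rw [PySem.Dict.ofList, get?_update]
      simp [PySem.Dict.get?, PySem.Dict.empty]
    have hmatch := lastv_goPairs u (goPairs (w.drop 1)) none
    simp only at hmatch
    cases hcontains : (PySem.Dict.ofList (goPairs (w.drop 1))).contains u with
    | false =>
      have : (PySem.Dict.ofList (goPairs (w.drop 1))).get? u = none :=
        (PySem.Dict.get?_eq_none_iff_contains _ _).2 hcontains
      rw [this] at hg
      rw [← hmatch, ← hg, this]
      simp
    | true =>
      obtain ⟨v, hv⟩ : ∃ v, (PySem.Dict.ofList (goPairs (w.drop 1))).get? u = some v := by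
        rcases hx : (PySem.Dict.ofList (goPairs (w.drop 1))).get? u with _ | v
        · rw [(PySem.Dict.get?_eq_none_iff_contains _ _).1 hx] at hcontains; cases hcontains
        · exact ⟨v, rfl⟩
      rw [← hmatch, ← hg, hv]
      simp
  rw [show unitsB = ["years", "months", "weeks", "days", "hours", "minutes", "seconds"] from rfl]
  simp only [List.map_cons, List.map_nil, hsel]

-- ===== VERDICT (by name: the statement is the Claim_ definition above) =====
theorem intervalDict_py_spec : Claim_equal_intervalDict_py := by
  intro interval _ _
  unfold Spec_intervalDict_py intervalDict_py intervalDict_py_alt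
  exact core ((PySem.Str.split? interval " ").getD [])
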